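-- pv_equiv track=rewrite | github.com/wisewizardofthestars/FP-project-1 | FINAL.py | validar_cifra
-- ===== SOURCE A (Python) =====
-- def validar_cifra(cif,s_c):
--     '''Função que devolve True se uma sequência de controlo está de acordo com
--     a cifra. Devolve False se não está.
--     -Input de duas strings, a cifra- cif- e a sequência de controlo - s_c
--     -Devolve um valor booleano, True ou False
--     validar_cifra: cad. carateres x cad. carateres ---> booleano
--     '''
--     len_cif=len(cif)
--     cont={}
--     for i in cif:
--         if i in cont and ord(i)!=45:
--             cont[i]+=1
--         if i not in cont and ord(i)!=45:
--             cont[i]=1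
--     # parte de contar as ocorrências de cada letra na cifra
--
--     lista_vlr,lista_key,cont_1=[],[],0
--     len_cont,lista_final=len(cont),[]
--     while len(lista_final)!=len_cont:
--         for i in cont:
--             lista_vlr+=[cont[i]]
--         m_valor=max(lista_vlr)
--         for i in cont:
--             if cont[i]==m_valor:
--                 lista_key+=[i]
--         lista_final+=sorted(lista_key)
--
--         for i in lista_final:
--                 if i in cont:
--                     del(cont[i])
--         lista_key,lista_vlr,cont_1=[],[],0
--
--     if list(s_c)[1:6]!=lista_final[0:5]:
--         return False
--     return True
-- ===== SOURCE B (Python) =====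
-- def validar_cifra(cif, s_c):
--     '''Alternative implementation: frequency buckets walked from highest
--     frequency down, instead of A's repeated max-scan-and-delete loop.'''
--     freq = {}
--     for ch in cif:
--         if ch != '-':
--             freq[ch] = freq.get(ch, 0) + 1
--     buckets = {}
--     for ch, f in freq.items():
--         buckets.setdefault(f, []).append(ch)
--     order = []
--     for f in sorted(buckets, reverse=True):
--         order += sorted(buckets[f])
--     return list(s_c)[1:6] == order[:5]
-- ===== Notes on version B (the rewrite author's own statement) =====
-- stated objective: alternative
-- what changed: A repeatedly rescans the whole counts dict for the current maximum, collects and deletes those keys until the dict is empty; B builds a frequency->letters bucket table once and walks the distinct frequencies in descending order, concatenating each alphabetically sorted bucket.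
import Mathlib
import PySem

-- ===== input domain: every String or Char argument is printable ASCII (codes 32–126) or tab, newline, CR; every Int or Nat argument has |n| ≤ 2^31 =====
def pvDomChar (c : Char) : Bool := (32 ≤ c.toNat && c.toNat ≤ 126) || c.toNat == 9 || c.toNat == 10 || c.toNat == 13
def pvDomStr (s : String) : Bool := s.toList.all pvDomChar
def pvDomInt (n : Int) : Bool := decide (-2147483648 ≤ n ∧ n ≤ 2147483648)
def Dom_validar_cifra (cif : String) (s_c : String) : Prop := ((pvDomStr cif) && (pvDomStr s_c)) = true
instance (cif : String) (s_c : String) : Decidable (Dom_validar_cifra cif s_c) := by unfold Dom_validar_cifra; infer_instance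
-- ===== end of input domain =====

-- B replaces A's repeated max-scan-and-delete over the counts dict by frequency
-- buckets walked once from the highest frequency down (alternative algorithm).

-- ===== PORT A =====
-- the while loop; fuel = number of distinct counted letters bounds the iterations.
-- The `none` branch of max? is Python's max([]), unreachable from validar_cifra:
-- the loop guard guarantees cont is nonempty there (shown in the equivalence proof).
def pvSelLoop (fuel : Nat) (cont : PySem.Dict Char Int) (lista_final : List Char)
    (len_cont : Nat) : List Char :=
  match fuel with
  | 0 => lista_final
  | fuel + 1 =>
    if lista_final.length = len_cont then lista_final
    else
      let lista_vlr := cont.keys.foldl (fun acc i => acc ++ [cont.getD i 0]) []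
      match PySem.List.max? lista_vlr (fun x => x) with
      | none => lista_final
      | some m_valor =>
        let lista_key := cont.keys.foldl
          (fun acc i => if cont.getD i 0 = m_valor then acc ++ [i] else acc) []
        let lista_final' := lista_final ++ PySem.List.sorted lista_key (fun x => x)
        let cont' := lista_final'.foldl (fun c i => if c.contains i then c.erase i else c) cont
        pvSelLoop fuel cont' lista_final' len_cont

def validar_cifra (cif : String) (s_c : String) : Bool :=
  let cont : PySem.Dict Char Int :=
    cif.toList.foldl (fun cont i =>
      let cont1 := if cont.contains i && !(i.toNat == 45) then cont.modify i 0 (· + 1) else cont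
      if !cont1.contains i && !(i.toNat == 45) then cont1.insert i 1 else cont1)
      PySem.Dict.empty
  let lista_final := pvSelLoop cont.size cont [] cont.size
  if PySem.List.slice s_c.toList (some 1) (some 6) ≠ PySem.List.slice lista_final (some 0) (some 5)
  then false else true

-- ===== PORT B =====
def validar_cifra_alt (cif : String) (s_c : String) : Bool :=
  let freq : PySem.Dict Char Int :=
    cif.toList.foldl (fun d ch => if ch ≠ '-' then d.insert ch (d.getD ch 0 + 1) else d)
      PySem.Dict.empty
  let buckets : PySem.Dict Int (List Char) :=
    freq.items.foldl (fun b p => b.modify p.2 [] (· ++ [p.1])) PySem.Dict.empty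
  let order := (PySem.List.sorted buckets.keys (fun x => x) true).foldl
    (fun acc f => acc ++ PySem.List.sorted (buckets.getD f []) (fun x => x)) []
  PySem.List.slice s_c.toList (some 1) (some 6) == PySem.List.slice order none (some 5)

-- ===== PRECONDITION & SPEC =====
def Spec_validar_cifra (cif : String) (s_c : String) (out : Bool) : Prop := out = validar_cifra_alt cif s_c
instance (cif : String) (s_c : String) (out : Bool) : Decidable (Spec_validar_cifra cif s_c out) := by unfold Spec_validar_cifra; infer_instance

-- ===== CLAIM (what is proved, stated in full; the proofs are below) =====
def Claim_equal_validar_cifra : Prop := ∀ (cif : String) (s_c : String), Dom_validar_cifra cif s_c → Spec_validar_cifra cif s_c (validar_cifra cif s_c)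

-- ===== LEMMAS AND PROOFS =====

-- the strict order "higher count first, ties by character code": both final lists are
-- permutations of the counted letters, strictly sorted by it, hence equal
def pvR (f : Char → Int) (a b : Char) : Prop := f b < f a ∨ (f a = f b ∧ a < b)

lemma pvR_antisymm (f : Char → Int) (a b : Char) (h1 : pvR f a b) (h2 : pvR f b a) : a = b := by
  rcases h1 with h1 | ⟨h1, h1'⟩ <;> rcases h2 with h2 | ⟨h2, h2'⟩ <;>
    first
      | exact absurd h2 (by omega)
      | exact absurd (lt_trans h1' h2') (lt_irrefl a)

lemma pvCharDash (i : Char) : (i.toNat == 45) = (i == '-') := by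
  by_cases h : i = '-'
  · subst h; decide
  · have h2 : i.toNat ≠ 45 := fun hn => h (Char.ext (UInt32.toNat_inj.mp hn))
    simp [h, h2]

-- A's two-if counting step equals B's get-based counting step
lemma pvStep_eq :
    (fun (cont : PySem.Dict Char Int) (i : Char) =>
      let cont1 := if cont.contains i && !(i.toNat == 45) then cont.modify i 0 (· + 1) else cont
      if !cont1.contains i && !(i.toNat == 45) then cont1.insert i 1 else cont1)
    = (fun (d : PySem.Dict Char Int) (ch : Char) =>
      if ch ≠ '-' then d.insert ch (d.getD ch 0 + 1) else d) := by
  funext d i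
  by_cases h : i = '-'
  · subst h; simp
  · have h45 : (i.toNat == 45) = false := by rw [pvCharDash]; simp [h]
    by_cases hc : d.contains i = true
    · simp only [h45, hc, Bool.not_false, Bool.and_true, PySem.Dict.modify,
        PySem.Dict.contains_insert_self, Bool.not_true, if_neg,
        Bool.false_eq_true, not_false_eq_true, h, ne_eq, if_pos]
    · have hc' : d.contains i = false := by simpa using hc
      simp only [h45, hc', Bool.not_false, Bool.and_true, if_neg, if_pos, Bool.false_eq_true,
        not_false_eq_true, h, ne_eq, PySem.Dict.getD_of_not_contains d 0 hc']
      norm_num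

-- A's deletion loop is an items filter
lemma pvEraseFold (l : List Char) :
    ∀ (d : PySem.Dict Char Int),
      (l.foldl (fun c i => if c.contains i then c.erase i else c) d).items
        = d.items.filter (fun p => !l.contains p.1) := by
  induction l with
  | nil => intro d; simp
  | cons i l ih =>
    intro d
    have hstep : (if d.contains i then d.erase i else d).items
        = d.items.filter (fun p => !(p.1 == i)) := by
      by_cases hc : d.contains i = true
      · simp [hc, PySem.Dict.erase]
      · have hc' : d.contains i = false := by simpa using hc
        rw [if_neg (by simp [hc'])]
        have : ∀ p ∈ d.items, (!(p.1 == i)) = true := by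
          intro p hp
          have hk : p.1 ∈ d.keys := List.mem_map_of_mem hp
          rw [PySem.Dict.contains_eq_decide_mem_keys] at hc'
          simp at hc'
          simp
          rintro rfl; exact hc' hk
        exact (List.filter_eq_self.mpr this).symm
    simp only [List.foldl_cons, ih, hstep, List.filter_filter]
    apply List.filter_congr
    intro p hp
    by_cases h : p.1 = i <;> by_cases h2 : p.1 ∈ l <;> simp [h, h2]

-- a list is the concatenation of its value-buckets taken over the distinct values
lemma pvPermFlatMapFilter {α κ : Type} [BEq κ] [LawfulBEq κ] (key : α → κ) :
    ∀ (vs : List κ) (l : List α), vs.Nodup → (∀ x ∈ l, key x ∈ vs) →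
      l.Perm (vs.flatMap (fun v => l.filter (fun x => key x == v))) := by
  intro vs
  induction vs with
  | nil =>
    intro l _ hall
    have : l = [] := by
      cases l with
      | nil => rfl
      | cons x xs => exact absurd (hall x (by simp)) (by simp)
    simp [this]
  | cons v vs ih =>
    intro l hnd hall
    rw [List.flatMap_cons]
    have hmemv : v ∉ vs := (List.nodup_cons.mp hnd).1
    have htail : ∀ v' ∈ vs, l.filter (fun x => key x == v')
        = (l.filter (fun x => !(key x == v))).filter (fun x => key x == v') := by
      intro v' hv'
      rw [List.filter_filter]
      apply List.filter_congr
      intro x hx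
      by_cases hk : key x = v'
      · have h0 : (key x == v) = false := by
          simp only [beq_eq_false_iff_ne]; rintro rfl; rw [hk] at hmemv; exact hmemv hv'
        simp [hk] at h0 ⊢
        simp [h0]
      · simp [hk]
    have hperm2 : (l.filter (fun x => !(key x == v))).Perm
        (vs.flatMap (fun v' => (l.filter (fun x => !(key x == v))).filter (fun x => key x == v'))) := by
      apply ih _ (List.nodup_cons.mp hnd).2
      intro x hx
      rw [List.mem_filter] at hx
      have := hall x hx.1
      simp only [List.mem_cons] at this
      rcases this with h | h
      · exfalso; rw [h] at hx; simpa using hx.2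
      · exact h
    have hflat : (vs.flatMap (fun v' => l.filter (fun x => key x == v')))
        = vs.flatMap (fun v' => (l.filter (fun x => !(key x == v))).filter (fun x => key x == v')) := by
      apply List.flatMap_congr
      intro v' hv'
      exact htail v' hv'
    rw [hflat]
    exact (List.filter_append_perm _ l).symm.trans (List.Perm.append_left _ hperm2)

-- a Nodup-keys dict determines getD from items
lemma pvF_keys (f : Char → Int) (d : PySem.Dict Char Int) (hnd : d.keys.Nodup)
    (hf : ∀ p ∈ d.items, f p.1 = p.2) : ∀ a ∈ d.keys, f a = d.getD a 0 := by
  intro a ha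
  rcases List.mem_map.mp ha with ⟨p, hp, rfl⟩
  rw [hf p hp, PySem.Dict.getD_of_mem_items d hp hnd]

-- A's while loop produces a permutation of the remaining keys, strictly sorted by pvR
lemma pvSelLoop_spec (f : Char → Int) :
    ∀ (fuel : Nat) (d : PySem.Dict Char Int) (acc : List Char) (n : Nat),
      d.keys.Nodup →
      (∀ p ∈ d.items, f p.1 = p.2) →
      (∀ a ∈ acc, a ∉ d.keys) →
      d.size ≤ fuel →
      n = acc.length + d.size →
      ∃ rest, pvSelLoop fuel d acc n = acc ++ rest ∧
        rest.Perm d.keys ∧ rest.Pairwise (pvR f) := by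
  intro fuel
  induction fuel with
  | zero =>
    intro d acc n hnd hf hacc hsz hn
    have hitems : d.items = [] := List.length_eq_zero_iff.mp (Nat.le_zero.mp hsz)
    refine ⟨[], by simp [pvSelLoop], ?_, List.Pairwise.nil⟩
    simp [PySem.Dict.keys, hitems]
  | succ fuel ih =>
    intro d acc n hnd hf hacc hsz hn
    by_cases hz : d.size = 0
    · have hitems : d.items = [] := List.length_eq_zero_iff.mp hz
      refine ⟨[], ?_, ?_, List.Pairwise.nil⟩
      · simp [pvSelLoop, hn, hz]
      · simp [PySem.Dict.keys, hitems]
    · have hguard : ¬ (acc.length = n) := by omega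
      have haux : ∀ a ∈ d.keys, f a = d.getD a 0 := pvF_keys f d hnd hf
      have hvlr : d.keys.foldl (fun acc i => acc ++ [d.getD i 0]) []
          = d.keys.map (fun i => d.getD i 0) := by
        rw [PySem.List.foldl_append_singleton_eq_map]; simp
      have hvlr_ne : d.keys.map (fun i => d.getD i 0) ≠ [] := by
        simp only [ne_eq, List.map_eq_nil_iff]
        intro h
        exact hz (by simpa [PySem.Dict.keys, PySem.Dict.size] using congrArg List.length h)
      obtain ⟨m, hmax⟩ : ∃ m, PySem.List.max? (d.keys.map (fun i => d.getD i 0)) (fun x => x) = some m := by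
        cases hc : PySem.List.max? (d.keys.map (fun i => d.getD i 0)) (fun x => x) with
        | none => exact absurd ((PySem.List.max?_eq_none_iff _ _).mp hc) hvlr_ne
        | some m => exact ⟨m, rfl⟩
      have hm_mem : m ∈ d.keys.map (fun i => d.getD i 0) := PySem.List.max?_mem hmax
      have hm_max : ∀ y ∈ d.keys.map (fun i => d.getD i 0), y ≤ m := by
        intro y hy; simpa using PySem.List.max?_isMax hmax y hy
      have hkey : d.keys.foldl (fun acc i => if d.getD i 0 = m then acc ++ [i] else acc) []
          = d.keys.filter (fun i => decide (d.getD i 0 = m)) := by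
        rw [PySem.List.foldl_append_ite_eq_filter]; simp
      set K := d.keys.filter (fun i => decide (d.getD i 0 = m)) with hK
      have hKnodup : K.Nodup := hnd.filter _
      have hKmem : ∀ a ∈ K, a ∈ d.keys ∧ d.getD a 0 = m := by
        intro a ha
        have := List.mem_filter.mp ha
        exact ⟨this.1, by simpa using this.2⟩
      set skey := PySem.List.sorted K (fun x => x) with hskey
      have hsperm : skey.Perm K := PySem.List.sorted_perm K _ false
      have hsnodup : skey.Nodup := hsperm.nodup_iff.mpr hKnodup
      have hsle : skey.Pairwise (fun a b => a ≤ b) := PySem.List.sorted_pairwise K _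
      have hslt : skey.Pairwise (fun a b => a < b) :=
        (List.Pairwise.and hsle hsnodup).imp (fun h => lt_of_le_of_ne h.1 h.2)
      set P : Char × Int → Bool := fun p => decide (p.2 = m) with hP
      have hcont' : ((acc ++ skey).foldl (fun c i => if c.contains i then c.erase i else c) d).items
          = d.items.filter (fun p => !P p) := by
        rw [pvEraseFold]
        apply List.filter_congr
        intro p hp
        have hpk : p.1 ∈ d.keys := List.mem_map_of_mem hp
        have hgp : d.getD p.1 0 = p.2 := PySem.Dict.getD_of_mem_items d hp hnd 0
        congr 1
        simp only [List.contains_eq_mem, List.mem_append, hP, decide_eq_decide]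
        constructor
        · rintro (h | h)
          · exact absurd hpk (hacc _ h)
          · rw [← hgp]; exact (hKmem _ (hsperm.mem_iff.mp h)).2
        · intro h
          right
          rw [hsperm.mem_iff, hK, List.mem_filter]
          exact ⟨hpk, by simp [hgp, h]⟩
      set d' := ((acc ++ skey).foldl (fun c i => if c.contains i then c.erase i else c) d) with hd'
      have hkeys' : d'.keys = (d.items.filter (fun p => !P p)).map (fun p => p.1) := by
        rw [PySem.Dict.keys, hcont']
      have hnd' : d'.keys.Nodup := by
        rw [hkeys']
        exact List.Nodup.sublist (List.Sublist.map _ List.filter_sublist) hnd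
      have hf' : ∀ p ∈ d'.items, f p.1 = p.2 := by
        intro p hp
        rw [hcont'] at hp
        exact hf p (List.mem_filter.mp hp).1
      have hacc' : ∀ a ∈ acc ++ skey, a ∉ d'.keys := by
        intro a ha hk'
        rw [hkeys'] at hk'
        rcases List.mem_map.mp hk' with ⟨p, hp, rfl⟩
        have hpfilt := List.mem_filter.mp hp
        have hpk : p.1 ∈ d.keys := List.mem_map_of_mem hpfilt.1
        have hgp : d.getD p.1 0 = p.2 := PySem.Dict.getD_of_mem_items d hpfilt.1 hnd 0
        rcases List.mem_append.mp ha with h | h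
        · exact (hacc _ h) hpk
        · have hm' : d.getD p.1 0 = m := (hKmem _ (hsperm.mem_iff.mp h)).2
          have : P p = true := by simp [hP, ← hgp, hm']
          simp [this] at hpfilt
      have hKlen : K.length = (d.items.filter P).length := by
        rw [hK, PySem.Dict.keys, List.filter_map, List.length_map]
        congr 1
        apply List.filter_congr
        intro p hp
        simp [hP, PySem.Dict.getD_of_mem_items d hp hnd 0]
      have hsplit : (d.items.filter P).length + (d.items.filter (fun p => !P p)).length = d.size := by
        rw [PySem.Dict.size]
        exact (List.length_eq_length_filter_add P).symm
      have hKpos : 0 < (d.items.filter P).length := by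
        rcases List.mem_map.mp hm_mem with ⟨k, hk, hkm⟩
        rcases List.mem_map.mp hk with ⟨p, hp, rfl⟩
        have : P p = true := by
          simp [hP, ← PySem.Dict.getD_of_mem_items d hp hnd 0, hkm]
        exact List.length_pos_of_mem (List.mem_filter.mpr ⟨hp, this⟩)
      have hsz' : d'.size ≤ fuel := by
        have : d'.size = (d.items.filter (fun p => !P p)).length := by
          rw [PySem.Dict.size, hcont']
        omega
      have hn' : n = (acc ++ skey).length + d'.size := by
        have h1 : skey.length = K.length := hsperm.length_eq
        have h2 : d'.size = (d.items.filter (fun p => !P p)).length := by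
          rw [PySem.Dict.size, hcont']
        rw [List.length_append]
        omega
      obtain ⟨rest', heq', hperm', hpair'⟩ := ih d' (acc ++ skey) n hnd' hf' hacc' hsz' hn'
      refine ⟨skey ++ rest', ?_, ?_, ?_⟩
      · show pvSelLoop (fuel + 1) d acc n = acc ++ (skey ++ rest')
        rw [pvSelLoop]
        rw [if_neg hguard]
        simp only [hvlr, hmax, hkey]
        rw [← hskey, ← hd', heq', List.append_assoc]
      · have hKeq : K = (d.items.filter P).map (fun p => p.1) := by
          rw [hK, PySem.Dict.keys, List.filter_map]
          congr 1
          apply List.filter_congr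
          intro p hp
          simp [hP, PySem.Dict.getD_of_mem_items d hp hnd 0]
        have h1 : List.Perm ((d.items.filter P).map (fun p => p.1)
            ++ (d.items.filter (fun p => !P p)).map (fun p => p.1)) d.keys := by
          rw [PySem.Dict.keys, ← List.map_append]
          exact (List.filter_append_perm P d.items).map _
        have h2 : List.Perm (skey ++ rest') ((d.items.filter P).map (fun p => p.1)
            ++ (d.items.filter (fun p => !P p)).map (fun p => p.1)) := by
          apply List.Perm.append
          · rw [← hKeq]; exact hsperm
          · rw [← hkeys']; exact hperm'
        exact h2.trans h1
      · have hfskey : ∀ a ∈ skey, f a = m := by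
          intro a ha
          have := hKmem a (hsperm.mem_iff.mp ha)
          rw [haux a this.1, this.2]
        have hfrest : ∀ b ∈ rest', f b < m := by
          intro b hb
          have hbk' : b ∈ d'.keys := hperm'.mem_iff.mp hb
          rw [hkeys'] at hbk'
          rcases List.mem_map.mp hbk' with ⟨p, hp, rfl⟩
          have hpfilt := List.mem_filter.mp hp
          have hpk : p.1 ∈ d.keys := List.mem_map_of_mem hpfilt.1
          have hgp : d.getD p.1 0 = p.2 := PySem.Dict.getD_of_mem_items d hpfilt.1 hnd 0
          have hle : d.getD p.1 0 ≤ m := hm_max _ (List.mem_map_of_mem hpk)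
          have hne : p.2 ≠ m := by simpa [hP] using hpfilt.2
          rw [haux _ hpk]
          omega
        rw [List.pairwise_append]
        refine ⟨?_, hpair', ?_⟩
        · apply hslt.imp_of_mem
          intro a b ha hb hab
          exact Or.inr ⟨by rw [hfskey a ha, hfskey b hb], hab⟩
        · intro a ha b hb
          exact Or.inl (by rw [hfskey a ha]; exact hfrest b hb)

-- B's bucket walk produces a permutation of the keys, strictly sorted by pvR
lemma pvOrder_spec (freq : PySem.Dict Char Int) (hnd : freq.keys.Nodup) :
    ∃ order,
      ((PySem.List.sorted (freq.items.foldl (fun b p => b.modify p.2 [] (· ++ [p.1]))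
          PySem.Dict.empty).keys (fun x => x) true).foldl
        (fun acc f => acc ++ PySem.List.sorted
          ((freq.items.foldl (fun b p => b.modify p.2 [] (· ++ [p.1]))
            PySem.Dict.empty).getD f []) (fun x => x)) []) = order ∧
      order.Perm freq.keys ∧ order.Pairwise (pvR (fun c => freq.getD c 0)) := by
  set f : Char → Int := fun c => freq.getD c 0 with hfdef
  have hf : ∀ p ∈ freq.items, f p.1 = p.2 := by
    intro p hp
    exact PySem.Dict.getD_of_mem_items freq hp hnd 0
  set buckets := freq.items.foldl (fun b p => b.modify p.2 [] (· ++ [p.1])) PySem.Dict.empty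
    with hbdef
  have hbk : buckets.keys = PySem.Set.ofList (freq.items.map (fun p => p.2)) := by
    rw [hbdef, PySem.Dict.keys_foldl_modify_key freq.items (fun p => p.2) []
      (fun b p => (· ++ [p.1]))]
    rw [PySem.Dict.keys_empty, PySem.Set.update_nil_left]
  have hbd : ∀ v, buckets.getD v [] = (freq.items.filter (fun p => p.2 == v)).map (fun p => p.1) := by
    intro v
    have hswap : buckets = (freq.items.map (fun p => (p.2, p.1))).foldl
        (fun b q => b.modify q.1 [] (· ++ [q.2])) PySem.Dict.empty := by
      rw [List.foldl_map]
    rw [hswap, PySem.Dict.getD_foldl_modify_append, PySem.Dict.getD_empty, List.nil_append,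
      List.filter_map, List.map_map]
    rfl
  set svals := PySem.List.sorted buckets.keys (fun x => x) true with hsv
  have hsvperm : svals.Perm (PySem.Set.ofList (freq.items.map (fun p => p.2))) := by
    rw [hsv, hbk]; exact PySem.List.sorted_perm _ _ true
  have hsvnodup : svals.Nodup := hsvperm.nodup_iff.mpr (PySem.Set.nodup_ofList _)
  have hsvge : svals.Pairwise (fun a b => b ≤ a) := by
    rw [hsv]; exact PySem.List.sorted_pairwise_rev _ _
  have hsvgt : svals.Pairwise (fun a b => b < a) :=
    (List.Pairwise.and hsvge hsvnodup).imp (fun h => lt_of_le_of_ne h.1 (Ne.symm h.2))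
  have hfold : (svals.foldl (fun acc v => acc ++ PySem.List.sorted (buckets.getD v []) (fun x => x)) [])
      = svals.flatMap (fun v => PySem.List.sorted (buckets.getD v []) (fun x => x)) := by
    rw [PySem.List.foldl_append_eq_flatMap]; simp
  refine ⟨_, rfl, ?_, ?_⟩
  · rw [hfold]
    have h1 : freq.items.Perm (svals.flatMap (fun v => freq.items.filter (fun p => p.2 == v))) := by
      apply pvPermFlatMapFilter (fun p => p.2) svals freq.items hsvnodup
      intro x hx
      rw [hsvperm.mem_iff, PySem.Set.mem_ofList]
      exact List.mem_map_of_mem hx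
    have h2 := h1.map (fun p => p.1)
    rw [List.map_flatMap] at h2
    refine (List.Perm.flatMap_left svals ?_).trans h2.symm
    intro v hv
    rw [hbd v]
    exact PySem.List.sorted_perm _ _ false
  · rw [hfold, List.pairwise_flatMap]
    have hbmem : ∀ v, ∀ a ∈ PySem.List.sorted (buckets.getD v []) (fun x => x), f a = v := by
      intro v a ha
      have hmem := (PySem.List.sorted_perm (buckets.getD v []) (fun x => x) false).mem_iff.mp ha
      rw [hbd v] at hmem
      rcases List.mem_map.mp hmem with ⟨p, hp, rfl⟩
      have := List.mem_filter.mp hp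
      rw [hf p this.1]
      simpa using this.2
    constructor
    · intro v hv
      have hsub : ((freq.items.filter (fun p => p.2 == v)).map (fun p => p.1)).Nodup :=
        List.Nodup.sublist (List.Sublist.map _ List.filter_sublist) hnd
      have hnodup : (PySem.List.sorted (buckets.getD v []) (fun x => x)).Nodup := by
        refine (PySem.List.sorted_perm _ _ false).nodup_iff.mpr ?_
        rw [hbd v]; exact hsub
      have hle := PySem.List.sorted_pairwise (buckets.getD v []) (fun x => x)
      have hlt := (List.Pairwise.and hle hnodup).imp
        (fun h => lt_of_le_of_ne h.1 h.2)
      apply hlt.imp_of_mem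
      intro a b ha hb hab
      exact Or.inr ⟨by rw [hbmem v a ha, hbmem v b hb], hab⟩
    · apply hsvgt.imp_of_mem
      intro v w hv hw hwv a ha b hb
      exact Or.inl (by rw [hbmem v a ha, hbmem w b hb]; exact hwv)

-- ===== VERDICT (by name: the statement is the Claim_ definition above) =====
theorem validar_cifra_spec : Claim_equal_validar_cifra := by
  intro cif s_c _
  show validar_cifra cif s_c = validar_cifra_alt cif s_c
  rw [validar_cifra, validar_cifra_alt, pvStep_eq]
  set freq : PySem.Dict Char Int := cif.toList.foldl
    (fun d ch => if ch ≠ '-' then d.insert ch (d.getD ch 0 + 1) else d)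
    PySem.Dict.empty with hfreq
  have hfilter : freq = (cif.toList.filter (fun ch => decide (ch ≠ '-'))).foldl
      (fun d ch => d.insert ch (d.getD ch 0 + 1)) PySem.Dict.empty := by
    rw [hfreq, PySem.List.foldl_ite_eq_foldl_filter]
  have hnd : freq.keys.Nodup := by
    rw [hfilter]
    exact PySem.Dict.nodup_keys_foldl_insert _ _ _ (by simp [PySem.Dict.keys_empty])
  have hfA : ∀ p ∈ freq.items, (fun c => freq.getD c 0) p.1 = p.2 := by
    intro p hp
    exact PySem.Dict.getD_of_mem_items freq hp hnd 0
  obtain ⟨restA, heqA, hpermA, hpairA⟩ := pvSelLoop_spec (fun c => freq.getD c 0)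
    freq.size freq [] freq.size hnd hfA (by simp) (le_refl _) (by simp)
  obtain ⟨order, heqB, hpermB, hpairB⟩ := pvOrder_spec freq hnd
  have hAB : restA = order :=
    List.Perm.eq_of_pairwise
      (fun a b _ _ h1 h2 => pvR_antisymm _ a b h1 h2)
      hpairA hpairB (hpermA.trans hpermB.symm)
  rw [heqA, heqB, List.nil_append, hAB, PySem.List.slice_zero_start]
  by_cases h : PySem.List.slice s_c.toList (some 1) (some 6)
      = PySem.List.slice order none (some 5)
  · simp [h]
  · simp [h]
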